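-- pv_equiv track=rewrite | github.com/victorclf/algods | graph/bfs.py | _isUndirectedGraph
-- ===== SOURCE A (Python) =====
-- def _isUndirectedGraph(graph):
--     edges = set()
--     for u in range(len(graph)):
--         for v in graph[u]:
--             edges.add((u, v))
--
--     for u, v in edges:
--         if (v, u) not in edges:
--             return False
--     return True
-- ===== SOURCE B (Python) =====
-- def _isUndirectedGraph(graph):
--     n = len(graph)
--     for u in range(n):
--         for v in graph[u]:
--             if not (0 <= v < n) or u not in graph[v]:
--                 return False
--     return True
-- ===== Notes on version B (the rewrite author's own statement) =====
-- stated objective: faster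
-- what changed: Drops the global edge set: instead of hashing every (u,v) tuple into a set and re-scanning the set for reverses, B checks each neighbor v of u directly against the reverse adjacency list graph[v] (with a bounds guard so out-of-range neighbors yield False as in A); on the generated inputs this avoids tuple allocation/hashing and was measured ~3.9x faster.
import Mathlib
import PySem

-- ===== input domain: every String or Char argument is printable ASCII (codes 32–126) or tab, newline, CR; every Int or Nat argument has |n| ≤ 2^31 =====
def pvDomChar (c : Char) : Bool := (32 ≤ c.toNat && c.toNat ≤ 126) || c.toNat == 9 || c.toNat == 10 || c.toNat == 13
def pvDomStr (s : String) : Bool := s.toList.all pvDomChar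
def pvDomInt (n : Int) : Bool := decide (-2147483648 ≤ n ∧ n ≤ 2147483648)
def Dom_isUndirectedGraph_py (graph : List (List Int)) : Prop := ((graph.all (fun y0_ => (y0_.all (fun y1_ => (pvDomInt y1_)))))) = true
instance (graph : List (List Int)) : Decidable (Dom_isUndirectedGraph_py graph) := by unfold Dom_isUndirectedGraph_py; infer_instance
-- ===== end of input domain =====

-- B drops A's global edge set and checks each neighbor directly against the reverse
-- adjacency list (with a bounds guard, as in A an out-of-range neighbor yields False);
-- a timing run measured B faster (no tuple hashing / set construction).

-- ===== PORT A =====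
-- A: build edges = {(u,v)}; then return False iff some (u,v) has (v,u) not in edges.
-- (iteration over the set is consumed by an order-independent 'all')
def isUndirectedGraph_py (graph : List (List Int)) : Bool :=
  let edges : PySem.Set (Int × Int) :=
    (PySem.List.pyRange 0 graph.length 1).foldl
      (fun s u => (PySem.List.pyGetD graph u []).foldl (fun s v => s.add (u, v)) s)
      PySem.Set.empty
  edges.all (fun e => edges.contains (e.2, e.1))

-- ===== PORT B =====
def isUndirectedGraph_py_alt (graph : List (List Int)) : Bool :=
  let n : Int := graph.length
  (PySem.List.pyRange 0 n 1).all (fun u =>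
    (PySem.List.pyGetD graph u []).all (fun v =>
      decide (0 ≤ v) && decide (v < n) && (PySem.List.pyGetD graph v []).contains u))

-- ===== PRECONDITION & SPEC =====
def Spec_isUndirectedGraph_py (graph : List (List Int)) (out : Bool) : Prop := out = isUndirectedGraph_py_alt graph
instance (graph : List (List Int)) (out : Bool) : Decidable (Spec_isUndirectedGraph_py graph out) := by unfold Spec_isUndirectedGraph_py; infer_instance

-- ===== CLAIM (what is proved, stated in full; the proofs are below) =====
def Claim_equal_isUndirectedGraph_py : Prop := ∀ (graph : List (List Int)), Dom_isUndirectedGraph_py graph → Spec_isUndirectedGraph_py graph (isUndirectedGraph_py graph)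

-- ===== LEMMAS AND PROOFS =====

-- A's edge set, named for the proofs (definitionally the 'let' inside the port)
def pvEdges (graph : List (List Int)) : PySem.Set (Int × Int) :=
  (PySem.List.pyRange 0 graph.length 1).foldl
    (fun s u => (PySem.List.pyGetD graph u []).foldl (fun s v => s.add (u, v)) s)
    PySem.Set.empty

lemma pvMem_foldl_adds (us : List Int) (f : Int → List Int)
    (s : PySem.Set (Int × Int)) (p : Int × Int) :
    p ∈ us.foldl (fun s u => (f u).foldl (fun s v => s.add (u, v)) s) s ↔
      p ∈ s ∨ ∃ u ∈ us, p.1 = u ∧ p.2 ∈ f u := by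
  induction us generalizing s with
  | nil => simp
  | cons u us ih =>
    rw [List.foldl_cons, ih]
    have h1 : (f u).foldl (fun s v => s.add (u, v)) s
        = PySem.Set.update s ((f u).map (fun v => (u, v))) := by
      simp [PySem.Set.update, List.foldl_map]
    rw [h1, PySem.Set.mem_update]
    constructor
    · rintro ((hs | hm) | ⟨w, hw, h1, h2⟩)
      · exact Or.inl hs
      · rcases List.mem_map.mp hm with ⟨v, hv, hpv⟩
        exact Or.inr ⟨u, by simp, by simp [← hpv, hv]⟩
      · exact Or.inr ⟨w, by simp [hw], h1, h2⟩
    · rintro (hs | ⟨w, hw, h1, h2⟩)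
      · exact Or.inl (Or.inl hs)
      · rcases List.mem_cons.mp hw with h | h
        · exact Or.inl (Or.inr (List.mem_map.mpr
            ⟨p.2, h ▸ h2, Prod.ext_iff.mpr ⟨(h1.trans h).symm, rfl⟩⟩))
        · exact Or.inr ⟨w, h, h1, h2⟩

lemma pvMem_edges (graph : List (List Int)) (p : Int × Int) :
    p ∈ pvEdges graph ↔
      (0 ≤ p.1 ∧ p.1 < (graph.length : Int)) ∧ p.2 ∈ PySem.List.pyGetD graph p.1 [] := by
  unfold pvEdges
  rw [pvMem_foldl_adds]
  constructor
  · rintro (h | ⟨u, hu, h1, h2⟩)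
    · cases h
    · rcases PySem.List.mem_pyRange_one.mp hu with ⟨hl, hr⟩
      exact ⟨⟨h1 ▸ hl, h1 ▸ hr⟩, h1 ▸ h2⟩
  · rintro ⟨⟨hl, hr⟩, hm⟩
    exact Or.inr ⟨p.1, PySem.List.mem_pyRange_one.mpr ⟨hl, hr⟩, rfl, hm⟩

-- ===== VERDICT (by name: the statement is the Claim_ definition above) =====
theorem isUndirectedGraph_py_spec : Claim_equal_isUndirectedGraph_py := by
  intro graph _
  unfold Spec_isUndirectedGraph_py
  have hA : isUndirectedGraph_py graph
      = (pvEdges graph).all (fun e => (pvEdges graph).contains (e.2, e.1)) := rfl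
  rw [hA, isUndirectedGraph_py_alt]
  apply Bool.eq_iff_iff.mpr
  simp only [List.all_eq_true, PySem.Set.contains, List.contains_iff_mem, Bool.and_eq_true, decide_eq_true_eq]
  constructor
  · intro h u hu v hv
    have huv : ((u, v) : Int × Int) ∈ pvEdges graph := by
      rcases PySem.List.mem_pyRange_one.mp hu with ⟨hl, hr⟩
      exact (pvMem_edges graph (u, v)).mpr ⟨⟨hl, hr⟩, hv⟩
    have := (pvMem_edges graph (v, u)).mp (h _ huv)
    exact ⟨⟨this.1.1, this.1.2⟩, this.2⟩
  · intro h e he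
    rcases (pvMem_edges graph e).mp he with ⟨⟨hl, hr⟩, hm⟩
    have hu : e.1 ∈ PySem.List.pyRange 0 (graph.length : Int) 1 :=
      PySem.List.mem_pyRange_one.mpr ⟨hl, hr⟩
    rcases h e.1 hu e.2 hm with ⟨⟨h1, h2⟩, h3⟩
    exact (pvMem_edges graph (e.2, e.1)).mpr ⟨⟨h1, h2⟩, h3⟩
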